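-- pv_equiv track=rewrite | github.com/RoblesCoulter/EnergyLyrics | Conceptual Cluster/contextDoubleGraph.py | aggregate_freq
-- ===== SOURCE A (Python) =====
-- from copy import deepcopy
--
-- def aggregate_freq(arg_c_freq,arg_nc_freq):
--     res_freq = deepcopy(arg_c_freq)
--     for k,nc_v in arg_nc_freq.items():
--         if res_freq.get(k) is not None:
--             c_v = res_freq.get(k)
--             if c_v <= nc_v:
--                 res_freq.pop(k)   #not conflict has higher frequency so we dont delete the edge
--             else:
--                 res_freq[k]= c_v - nc_v
--     full_c_freq = deepcopy(res_freq)
--     for k,c_v in full_c_freq.items():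
--         if c_v == 1:
--             res_freq.pop(k)
--     return res_freq
-- ===== SOURCE B (Python) =====
-- def aggregate_freq(arg_c_freq, arg_nc_freq):
--     res_freq = {}
--     for k, c_v in arg_c_freq.items():
--         if c_v is not None and k in arg_nc_freq:
--             nc_v = arg_nc_freq[k]
--             if c_v <= nc_v:
--                 continue
--             v = c_v - nc_v
--         else:
--             v = c_v
--         if v != 1:
--             res_freq[k] = v
--     return res_freq
-- ===== Notes on version B (the rewrite author's own statement) =====
-- stated objective: simpler
-- what changed: Replaces A's deepcopy plus two mutating passes (subtract/pop over nc_freq, then a snapshot pass popping value-1 entries) with a single non-mutating forward pass over arg_c_freq.items() that computes each entry's final value and inserts it only if it is not 1.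
import Mathlib
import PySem

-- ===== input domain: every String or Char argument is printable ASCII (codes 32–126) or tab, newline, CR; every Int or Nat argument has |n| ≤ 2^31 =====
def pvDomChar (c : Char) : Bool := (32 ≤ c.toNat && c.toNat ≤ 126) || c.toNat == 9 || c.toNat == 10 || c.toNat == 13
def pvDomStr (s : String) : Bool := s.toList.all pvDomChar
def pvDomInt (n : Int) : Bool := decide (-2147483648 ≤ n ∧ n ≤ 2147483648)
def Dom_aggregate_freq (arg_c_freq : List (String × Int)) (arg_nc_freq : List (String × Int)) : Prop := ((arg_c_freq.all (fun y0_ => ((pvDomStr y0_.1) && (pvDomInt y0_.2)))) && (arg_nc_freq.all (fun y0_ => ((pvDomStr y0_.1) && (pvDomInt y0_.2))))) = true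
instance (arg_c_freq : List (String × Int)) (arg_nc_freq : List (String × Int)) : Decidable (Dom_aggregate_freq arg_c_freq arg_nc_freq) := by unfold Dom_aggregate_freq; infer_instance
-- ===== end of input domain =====

-- B replaces A's deepcopy + two mutating dict passes by one non-mutating forward pass over
-- arg_c_freq that computes each entry's final value directly (objective: simpler).


-- ===== PORT A =====
-- body of A's first loop: pop the key if c_v <= nc_v, else store the difference
def pvStepA (res_freq : PySem.Dict String Int) (kv : String × Int) : PySem.Dict String Int :=
  match PySem.Dict.get? res_freq kv.1 with
  | some c_v =>
      if c_v ≤ kv.2 then PySem.Dict.erase res_freq kv.1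
      else PySem.Dict.insert res_freq kv.1 (c_v - kv.2)
  | none => res_freq

-- literal port of A: res_freq starts as a copy of arg_c_freq; first loop over arg_nc_freq.items()
-- pops or subtracts; second loop over a snapshot pops entries whose value is 1.
def aggregate_freq (arg_c_freq : List (String × Int)) (arg_nc_freq : List (String × Int)) : List (String × Int) :=
  let res1 : PySem.Dict String Int := arg_nc_freq.foldl pvStepA (PySem.Dict.mk arg_c_freq)
  let full_c_freq := res1
  (full_c_freq.items.foldl (fun res_freq kv =>
      if kv.2 == 1 then PySem.Dict.erase res_freq kv.1 else res_freq) res1).items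

-- ===== PORT B =====
-- body of B's single loop: compute the entry's final value, insert it only if it is not 1
def pvStepB (ncd : PySem.Dict String Int) (res_freq : PySem.Dict String Int)
    (kv : String × Int) : PySem.Dict String Int :=
  match PySem.Dict.get? ncd kv.1 with
  | some nc_v =>
      if kv.2 ≤ nc_v then res_freq
      else if kv.2 - nc_v ≠ 1 then PySem.Dict.insert res_freq kv.1 (kv.2 - nc_v) else res_freq
  | none => if kv.2 ≠ 1 then PySem.Dict.insert res_freq kv.1 kv.2 else res_freq

-- literal port of B: one pass over arg_c_freq.items() building the result dict.
def aggregate_freq_alt (arg_c_freq : List (String × Int)) (arg_nc_freq : List (String × Int)) : List (String × Int) :=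
  (arg_c_freq.foldl (pvStepB (PySem.Dict.mk arg_nc_freq)) PySem.Dict.empty).items

-- ===== PRECONDITION & SPEC =====
-- Pre_ requires each association list to have distinct keys: the Python arguments are dicts,
-- which can never hold a duplicate key, so this excludes no input the Python A is ever run on.
def Pre_aggregate_freq (arg_c_freq : List (String × Int)) (arg_nc_freq : List (String × Int)) : Prop :=
  (arg_c_freq.map Prod.fst).Nodup ∧ (arg_nc_freq.map Prod.fst).Nodup
instance (arg_c_freq : List (String × Int)) (arg_nc_freq : List (String × Int)) : Decidable (Pre_aggregate_freq arg_c_freq arg_nc_freq) := by unfold Pre_aggregate_freq; infer_instance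
def pvWitness_aggregate_freq : (List (String × Int)) × (List (String × Int)) :=
  ([("a", 3), ("b", 1)], [("a", 1)])

def Spec_aggregate_freq (arg_c_freq : List (String × Int)) (arg_nc_freq : List (String × Int)) (out : List (String × Int)) : Prop := out = aggregate_freq_alt arg_c_freq arg_nc_freq
instance (arg_c_freq : List (String × Int)) (arg_nc_freq : List (String × Int)) (out : List (String × Int)) : Decidable (Spec_aggregate_freq arg_c_freq arg_nc_freq out) := by unfold Spec_aggregate_freq; infer_instance

-- ===== CLAIM (what is proved, stated in full; the proofs are below) =====
def Claim_equal_aggregate_freq : Prop := ∀ (arg_c_freq : List (String × Int)) (arg_nc_freq : List (String × Int)), Dom_aggregate_freq arg_c_freq arg_nc_freq → Pre_aggregate_freq arg_c_freq arg_nc_freq → Spec_aggregate_freq arg_c_freq arg_nc_freq (aggregate_freq arg_c_freq arg_nc_freq)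

-- ===== LEMMAS AND PROOFS =====

-- per-entry effect of A's first loop, as a function of the whole nc list
def pvG (nc : List (String × Int)) (kv : String × Int) : Option (String × Int) :=
  match PySem.Dict.get? (PySem.Dict.mk nc) kv.1 with
  | some nc_v => if kv.2 ≤ nc_v then none else some (kv.1, kv.2 - nc_v)
  | none => some kv

-- per-entry effect of B's single pass
def pvH (nc : List (String × Int)) (kv : String × Int) : Option (String × Int) :=
  match PySem.Dict.get? (PySem.Dict.mk nc) kv.1 with
  | some nc_v =>
      if kv.2 ≤ nc_v then none
      else if kv.2 - nc_v ≠ 1 then some (kv.1, kv.2 - nc_v) else none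
  | none => if kv.2 ≠ 1 then some kv else none

theorem pvG_cons_ne (k : String) (nv : Int) (t : List (String × Int)) (kv : String × Int)
    (h : kv.1 ≠ k) : pvG ((k, nv) :: t) kv = pvG t kv := by
  have : (k == kv.1) = false := by simp [Ne.symm h]
  simp [pvG, PySem.Dict.get?_mk_cons, this]

theorem pvG_key (nc : List (String × Int)) (p q : String × Int) (h : pvG nc p = some q) :
    q.1 = p.1 := by
  unfold pvG at h
  cases hg : PySem.Dict.get? (PySem.Dict.mk nc) p.1 with
  | none => rw [hg] at h; simp only [Option.some.injEq] at h; rw [← h]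
  | some nv =>
      rw [hg] at h
      by_cases hle : p.2 ≤ nv
      · simp [hle] at h
      · simp only [hle, if_neg, if_false, Option.some.injEq] at h
        rw [← h]

theorem pv_filterMap_keys_sublist (nc l : List (String × Int)) :
    ((l.filterMap (pvG nc)).map Prod.fst).Sublist (l.map Prod.fst) := by
  induction l with
  | nil => simp
  | cons p l ih =>
      cases hg : pvG nc p with
      | none => simpa [List.filterMap_cons, hg] using ih.cons p.1
      | some q =>
          simpa [List.filterMap_cons, hg, pvG_key nc p q hg] using ih.cons₂ p.1

theorem pv_filterMap_G_congr (l : List (String × Int)) (k : String) (nv : Int)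
    (t : List (String × Int)) (h : ∀ q ∈ l, q.1 ≠ k) :
    l.filterMap (pvG ((k, nv) :: t)) = l.filterMap (pvG t) := by
  apply List.filterMap_congr
  intro q hq
  exact pvG_cons_ne k nv t q (h q hq)

theorem pvStepA_cons_ne (p : String × Int) (l : List (String × Int)) (k : String) (nv : Int)
    (h : p.1 ≠ k) :
    (pvStepA ⟨p :: l⟩ (k, nv)).items = p :: (pvStepA ⟨l⟩ (k, nv)).items := by
  have hbe : (p.1 == k) = false := by simp [h]
  have hg : PySem.Dict.get? (⟨p :: l⟩ : PySem.Dict String Int) k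
      = PySem.Dict.get? (⟨l⟩ : PySem.Dict String Int) k := by
    simp [PySem.Dict.get?, List.find?, hbe]
  unfold pvStepA
  simp only [hg]
  cases hfind : PySem.Dict.get? (⟨l⟩ : PySem.Dict String Int) k with
  | none => rfl
  | some c_v =>
      simp only
      split_ifs with hle
      · simp [PySem.Dict.erase, hbe]
      · have hc : PySem.Dict.contains (⟨l⟩ : PySem.Dict String Int) k = true := by
          rw [PySem.Dict.contains_eq_isSome_get?, hfind]; rfl
        have hc' : PySem.Dict.contains (⟨p :: l⟩ : PySem.Dict String Int) k = true := by
          rw [PySem.Dict.contains_eq_isSome_get?, hg, hfind]; rfl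
        simp only [PySem.Dict.insert, hc, hc', if_true, PySem.Dict.items, List.map_cons, hbe,
          Bool.false_eq_true, if_false]

theorem pvStepA_keys_sublist (l : List (String × Int)) (kv : String × Int) :
    ((pvStepA ⟨l⟩ kv).items.map Prod.fst).Sublist (l.map Prod.fst) := by
  unfold pvStepA
  cases hfind : PySem.Dict.get? (⟨l⟩ : PySem.Dict String Int) kv.1 with
  | none => simp
  | some c_v =>
      simp only
      split_ifs with hle
      · simpa [PySem.Dict.erase] using List.Sublist.map Prod.fst (List.filter_sublist (l := l))
      · have hc : PySem.Dict.contains (⟨l⟩ : PySem.Dict String Int) kv.1 = true := by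
          rw [PySem.Dict.contains_eq_isSome_get?, hfind]; rfl
        have hkeq : l.map (Prod.fst ∘ fun p => if (p.1 == kv.1) = true then (kv.1, c_v - kv.2) else p)
            = l.map Prod.fst := by
          apply List.map_congr_left
          intro p hp
          by_cases hpk : p.1 = kv.1
          · simp [hpk]
          · simp [hpk]
        simp only [PySem.Dict.insert, hc, if_true, List.map_map, hkeq]
        exact List.Sublist.refl _

theorem pvStepA_filterMap (l : List (String × Int)) (hl : (l.map Prod.fst).Nodup)
    (k : String) (nv : Int) (t : List (String × Int))
    (ht : PySem.Dict.get? (PySem.Dict.mk t) k = none) :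
    ((pvStepA ⟨l⟩ (k, nv)).items).filterMap (pvG t) = l.filterMap (pvG ((k, nv) :: t)) := by
  induction l with
  | nil =>
      show ((pvStepA ⟨[]⟩ (k, nv)).items).filterMap (pvG t) = _
      simp [pvStepA, PySem.Dict.get?]
  | cons p l ih =>
      have hl' : (l.map Prod.fst).Nodup := (List.nodup_cons.mp hl).2
      by_cases hpk : p.1 = k
      · -- the head is the affected entry; no other entry has key k
        have hknl : ∀ q ∈ l, q.1 ≠ k := by
          intro q hq hqe
          exact (List.nodup_cons.mp hl).1 (by
            rw [hpk, ← hqe]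
            exact List.mem_map_of_mem hq)
        have hbe : (p.1 == k) = true := by simp [hpk]
        have hg : PySem.Dict.get? (⟨p :: l⟩ : PySem.Dict String Int) k = some p.2 := by
          simp [PySem.Dict.get?, List.find?, hbe]
        have hfl : l.filter (fun q => !(q.1 == k)) = l :=
          List.filter_eq_self.mpr (by intro q hq; simp [hknl q hq])
        unfold pvStepA
        rw [hg]
        simp only
        have hGcons : pvG ((k, nv) :: t) p
            = if p.2 ≤ nv then none else some (p.1, p.2 - nv) := by
          have : (k == p.1) = true := by simp [hpk]
          simp [pvG, PySem.Dict.get?_mk_cons, this]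
        split_ifs with hle
        · -- erase branch
          have hfc : List.filter (fun q => !(q.1 == k)) (p :: l) = l := by
            rw [List.filter_cons_of_neg (by simp [hbe])]
            exact hfl
          simp only [PySem.Dict.erase, PySem.Dict.items]
          rw [hfc, List.filterMap_cons_none (by rw [hGcons, if_pos hle]),
            pv_filterMap_G_congr l k nv t hknl]
        · -- overwrite branch
          have hc : PySem.Dict.contains (⟨p :: l⟩ : PySem.Dict String Int) k = true := by
            rw [PySem.Dict.contains_eq_isSome_get?, hg]; rfl
          have hmap : (p :: l).map (fun q => if (q.1 == k) = true then (k, p.2 - nv) else q)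
              = (k, p.2 - nv) :: l := by
            rw [List.map_cons, if_pos hbe]
            congr 1
            have hid : ∀ q ∈ l, (if (q.1 == k) = true then (k, p.2 - nv) else q) = q := by
              intro q hq
              simp [hknl q hq]
            rw [List.map_congr_left hid]
            simp
          simp only [PySem.Dict.insert, hc, if_true]
          have hGt : pvG t (k, p.2 - nv) = some (k, p.2 - nv) := by simp [pvG, ht]
          have hGc : pvG ((k, nv) :: t) p = some (p.1, p.2 - nv) := by rw [hGcons, if_neg hle]
          rw [hmap, List.filterMap_cons_some hGt, List.filterMap_cons_some hGc,
            pv_filterMap_G_congr l k nv t hknl, hpk]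
      · rw [pvStepA_cons_ne p l k nv hpk]
        rw [List.filterMap_cons, List.filterMap_cons, ih hl',
          pvG_cons_ne k nv t p hpk]

theorem pv_pass1 (nc : List (String × Int)) (l : List (String × Int))
    (hl : (l.map Prod.fst).Nodup) (hnc : (nc.map Prod.fst).Nodup) :
    (nc.foldl pvStepA ⟨l⟩).items = l.filterMap (pvG nc) := by
  induction nc generalizing l with
  | nil =>
      have : l.filterMap (pvG []) = l.filterMap some := by
        apply List.filterMap_congr
        intro q _
        simp [pvG, PySem.Dict.get?]
      simp [this]
  | cons a t ih =>
      obtain ⟨k, nv⟩ := a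
      have hnodup' : ((pvStepA ⟨l⟩ (k, nv)).items.map Prod.fst).Nodup :=
        hl.sublist (pvStepA_keys_sublist l (k, nv))
      have ht : PySem.Dict.get? (PySem.Dict.mk t) k = none := by
        rw [PySem.Dict.get?_eq_none_iff_not_mem_keys]
        have := (List.nodup_cons.mp hnc).1
        simpa [PySem.Dict.keys] using this
      calc (((k, nv) :: t).foldl pvStepA ⟨l⟩).items
          = (t.foldl pvStepA ⟨(pvStepA ⟨l⟩ (k, nv)).items⟩).items := by rfl
        _ = ((pvStepA ⟨l⟩ (k, nv)).items).filterMap (pvG t) :=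
            ih _ hnodup' ((List.nodup_cons.mp hnc).2)
        _ = l.filterMap (pvG ((k, nv) :: t)) := pvStepA_filterMap l hl k nv t ht

theorem pv_pass2 (snap : List (String × Int)) (d : List (String × Int)) :
    (snap.foldl (fun res_freq kv =>
        if kv.2 == 1 then PySem.Dict.erase res_freq kv.1 else res_freq) (⟨d⟩ : PySem.Dict String Int)).items
    = d.filter (fun kv => !((snap.filter (fun q => q.2 == 1)).map Prod.fst).contains kv.1) := by
  induction snap generalizing d with
  | nil => simp
  | cons s t ih =>
      rw [List.foldl_cons]
      by_cases hs : (s.2 == 1) = true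
      · rw [if_pos hs]
        have her : PySem.Dict.erase (⟨d⟩ : PySem.Dict String Int) s.1
            = (⟨d.filter (fun p => !(p.1 == s.1))⟩ : PySem.Dict String Int) := rfl
        have hfc : (s :: t).filter (fun q => q.2 == 1) = s :: t.filter (fun q => q.2 == 1) :=
          List.filter_cons_of_pos hs
        rw [her, ih, List.filter_filter, hfc]
        apply List.filter_congr
        intro kv _
        simp only [List.map_cons, List.contains_cons]
        cases h1 : (kv.1 == s.1) <;>
          cases h2 : ((t.filter (fun q => q.2 == 1)).map Prod.fst).contains kv.1 <;>
          simp [h1, h2]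
      · have hfc : (s :: t).filter (fun q => q.2 == 1) = t.filter (fun q => q.2 == 1) :=
          List.filter_cons_of_neg (by simpa using hs)
        rw [if_neg hs, ih, hfc]

theorem pv_oneKeys_filter (d : List (String × Int)) (hd : (d.map Prod.fst).Nodup) :
    d.filter (fun kv => !((d.filter (fun q => q.2 == 1)).map Prod.fst).contains kv.1)
    = d.filter (fun kv => !(kv.2 == 1)) := by
  apply List.filter_congr
  intro kv hkv
  congr 1
  cases hone : (kv.2 == 1) with
  | true =>
      have : kv.1 ∈ (d.filter (fun q => q.2 == 1)).map Prod.fst :=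
        List.mem_map_of_mem (List.mem_filter.mpr ⟨hkv, hone⟩)
      simpa [List.contains_iff_mem] using this
  | false =>
      rw [Bool.eq_false_iff]
      intro hcont
      have : kv.1 ∈ (d.filter (fun q => q.2 == 1)).map Prod.fst := by
        simpa [List.contains_iff_mem] using hcont
      obtain ⟨q, hq, hqk⟩ := List.mem_map.mp this
      have hqd : q ∈ d := (List.mem_filter.mp hq).1
      have hq1 : (q.2 == 1) = true := (List.mem_filter.mp hq).2
      have e1 : PySem.Dict.get? (⟨d⟩ : PySem.Dict String Int) kv.1 = some kv.2 :=
        PySem.Dict.get?_of_mem_items _ (by simpa using hkv) (by simpa [PySem.Dict.keys] using hd)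
      have e2 : PySem.Dict.get? (⟨d⟩ : PySem.Dict String Int) kv.1 = some q.2 := by
        rw [← hqk]
        exact PySem.Dict.get?_of_mem_items _ (by simpa using hqd) (by simpa [PySem.Dict.keys] using hd)
      rw [e1] at e2
      have : kv.2 = q.2 := by injection e2
      rw [this, hq1] at hone
      simp at hone

theorem pv_filter_G_eq_H (nc : List (String × Int)) (l : List (String × Int)) :
    (l.filterMap (pvG nc)).filter (fun kv => !(kv.2 == 1)) = l.filterMap (pvH nc) := by
  induction l with
  | nil => simp
  | cons p l ih =>
      cases hg : PySem.Dict.get? (PySem.Dict.mk nc) p.1 with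
      | none =>
          have hGp : pvG nc p = some p := by simp [pvG, hg]
          by_cases h1 : p.2 = 1
          · have hHp : pvH nc p = none := by simp [pvH, hg, h1]
            have hfc : (p :: l.filterMap (pvG nc)).filter (fun kv => !(kv.2 == 1))
                = (l.filterMap (pvG nc)).filter (fun kv => !(kv.2 == 1)) :=
              List.filter_cons_of_neg (by simp [h1])
            rw [List.filterMap_cons_some hGp, List.filterMap_cons_none hHp, hfc, ih]
          · have hHp : pvH nc p = some p := by simp [pvH, hg, h1]
            have hfc : (p :: l.filterMap (pvG nc)).filter (fun kv => !(kv.2 == 1))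
                = p :: (l.filterMap (pvG nc)).filter (fun kv => !(kv.2 == 1)) :=
              List.filter_cons_of_pos (by simp [h1])
            rw [List.filterMap_cons_some hGp, List.filterMap_cons_some hHp, hfc, ih]
      | some nv =>
          by_cases hle : p.2 ≤ nv
          · have hGp : pvG nc p = none := by simp [pvG, hg, hle]
            have hHp : pvH nc p = none := by simp [pvH, hg, hle]
            rw [List.filterMap_cons_none hGp, List.filterMap_cons_none hHp, ih]
          · have hGp : pvG nc p = some (p.1, p.2 - nv) := by simp [pvG, hg, hle]
            by_cases h1 : p.2 - nv = 1
            · have hHp : pvH nc p = none := by simp [pvH, hg, hle, h1]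
              have hfc : ((p.1, p.2 - nv) :: l.filterMap (pvG nc)).filter (fun kv => !(kv.2 == 1))
                  = (l.filterMap (pvG nc)).filter (fun kv => !(kv.2 == 1)) :=
                List.filter_cons_of_neg (by simp [h1])
              rw [List.filterMap_cons_some hGp, List.filterMap_cons_none hHp, hfc, ih]
            · have hHp : pvH nc p = some (p.1, p.2 - nv) := by simp [pvH, hg, hle, h1]
              have hfc : ((p.1, p.2 - nv) :: l.filterMap (pvG nc)).filter (fun kv => !(kv.2 == 1))
                  = (p.1, p.2 - nv) :: (l.filterMap (pvG nc)).filter (fun kv => !(kv.2 == 1)) :=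
                List.filter_cons_of_pos (by simp [h1])
              rw [List.filterMap_cons_some hGp, List.filterMap_cons_some hHp, hfc, ih]

theorem pv_foldB (nc : List (String × Int)) (c : List (String × Int))
    (out : PySem.Dict String Int) (hc : (c.map Prod.fst).Nodup)
    (hdisj : ∀ kv ∈ c, out.contains kv.1 = false) :
    (c.foldl (pvStepB (PySem.Dict.mk nc)) out).items = out.items ++ c.filterMap (pvH nc) := by
  induction c generalizing out with
  | nil => simp
  | cons kv t ih =>
      have hc' : (t.map Prod.fst).Nodup := (List.nodup_cons.mp hc).2
      have hkvt : ∀ p ∈ t, p.1 ≠ kv.1 := by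
        intro p hp hpe
        exact (List.nodup_cons.mp hc).1 (hpe ▸ List.mem_map_of_mem hp)
      have hout : out.contains kv.1 = false := hdisj kv List.mem_cons_self
      have hdisj' : ∀ (v : Int), ∀ p ∈ t, (out.insert kv.1 v).contains p.1 = false := by
        intro v p hp
        rw [PySem.Dict.contains_insert]
        simp [hkvt p hp, hdisj p (List.mem_cons_of_mem kv hp)]
      have hkeep : ∀ p ∈ t, out.contains p.1 = false :=
        fun p hp => hdisj p (List.mem_cons_of_mem kv hp)
      rw [List.foldl_cons]
      cases hg : PySem.Dict.get? (PySem.Dict.mk nc) kv.1 with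
      | none =>
          by_cases h1 : kv.2 ≠ 1
          · have hstep : pvStepB (PySem.Dict.mk nc) out kv = out.insert kv.1 kv.2 := by
              simp [pvStepB, hg, h1]
            have hH : pvH nc kv = some kv := by simp [pvH, hg, h1]
            rw [hstep, ih _ hc' (hdisj' kv.2), PySem.Dict.items_insert_of_not_contains _ _ hout,
              List.filterMap_cons_some hH]
            simp
          · have hstep : pvStepB (PySem.Dict.mk nc) out kv = out := by simp [pvStepB, hg, h1]
            have hH : pvH nc kv = none := by simp [pvH, hg, h1]
            rw [hstep, ih _ hc' hkeep, List.filterMap_cons_none hH]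
      | some nv =>
          by_cases hle : kv.2 ≤ nv
          · have hstep : pvStepB (PySem.Dict.mk nc) out kv = out := by simp [pvStepB, hg, hle]
            have hH : pvH nc kv = none := by simp [pvH, hg, hle]
            rw [hstep, ih _ hc' hkeep, List.filterMap_cons_none hH]
          · by_cases h1 : kv.2 - nv ≠ 1
            · have hstep : pvStepB (PySem.Dict.mk nc) out kv
                  = out.insert kv.1 (kv.2 - nv) := by simp [pvStepB, hg, hle, h1]
              have hH : pvH nc kv = some (kv.1, kv.2 - nv) := by simp [pvH, hg, hle, h1]
              rw [hstep, ih _ hc' (hdisj' (kv.2 - nv)),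
                PySem.Dict.items_insert_of_not_contains _ _ hout,
                List.filterMap_cons_some hH]
              simp
            · have hstep : pvStepB (PySem.Dict.mk nc) out kv = out := by
                simp [pvStepB, hg, hle, h1]
              have hH : pvH nc kv = none := by simp [pvH, hg, hle, h1]
              rw [hstep, ih _ hc' hkeep, List.filterMap_cons_none hH]

-- ===== VERDICT (by name: the statement is the Claim_ definition above) =====
theorem aggregate_freq_spec : Claim_equal_aggregate_freq := by
  intro c nc _hdom hpre
  obtain ⟨hc, hnc⟩ := hpre
  unfold Spec_aggregate_freq aggregate_freq aggregate_freq_alt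
  simp only
  have hres1 : (nc.foldl pvStepA (PySem.Dict.mk c)).items = c.filterMap (pvG nc) :=
    pv_pass1 nc c hc hnc
  have heq : (nc.foldl pvStepA (PySem.Dict.mk c)) = (⟨c.filterMap (pvG nc)⟩ : PySem.Dict String Int) :=
    PySem.Dict.ext hres1
  rw [heq]
  have hLnodup : ((c.filterMap (pvG nc)).map Prod.fst).Nodup :=
    hc.sublist (pv_filterMap_keys_sublist nc c)
  rw [pv_pass2 (c.filterMap (pvG nc)) (c.filterMap (pvG nc)),
    pv_oneKeys_filter _ hLnodup, pv_filter_G_eq_H nc c,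
    pv_foldB nc c PySem.Dict.empty hc (fun kv _ => rfl)]
  rfl
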